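-- pv_equiv track=rewrite | github.com/Dixith-ai/Learning-Python | .automation/files/advanced/longest_consecutive_sequence.py | longest_consecutive_sequence_with_count
-- ===== SOURCE A (Python) =====
-- def longest_consecutive_sequence_with_count(nums):
--     if not nums:
--         return 0
--
--     num_set = set(nums)
--     max_length = 0
--     count = 0
--
--     for num in num_set:
--         if num - 1 not in num_set:
--             current_num = num
--             current_length = 1
--
--             while current_num + 1 in num_set:
--                 current_num += 1
--                 current_length += 1
--
--             if current_length > max_length:
--                 max_length = current_length
--                 count = 1
--             elif current_length == max_length:
--                 count += 1
--
--     return max_length, count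
-- ===== SOURCE B (Python) =====
-- def longest_consecutive_sequence_with_count(nums):
--     if not nums:
--         return 0
--     s = sorted(set(nums))
--     # split the strictly increasing list into maximal runs of consecutive ints
--     lengths = []
--     run = 1
--     for prev, x in zip(s, s[1:]):
--         if x == prev + 1:
--             run += 1
--         else:
--             lengths.append(run)
--             run = 1
--     lengths.append(run)
--     max_length = 0
--     count = 0
--     for length in lengths:
--         if length > max_length:
--             max_length, count = length, 1
--         elif length == max_length:
--             count += 1
--     return max_length, count
-- ===== Notes on version B (the rewrite author's own statement) =====
-- stated objective: alternative
-- what changed: Replaces the hash-set expansion (for each run start, walk forward with repeated membership tests) by sort-then-scan: sort the distinct values, split the strictly increasing list into maximal consecutive runs in one pass, then take max and count of the run lengths.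
-- outside the precondition, e.g. on longest_consecutive_sequence_with_count([]): A returns 0, B returns 0
import Mathlib
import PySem

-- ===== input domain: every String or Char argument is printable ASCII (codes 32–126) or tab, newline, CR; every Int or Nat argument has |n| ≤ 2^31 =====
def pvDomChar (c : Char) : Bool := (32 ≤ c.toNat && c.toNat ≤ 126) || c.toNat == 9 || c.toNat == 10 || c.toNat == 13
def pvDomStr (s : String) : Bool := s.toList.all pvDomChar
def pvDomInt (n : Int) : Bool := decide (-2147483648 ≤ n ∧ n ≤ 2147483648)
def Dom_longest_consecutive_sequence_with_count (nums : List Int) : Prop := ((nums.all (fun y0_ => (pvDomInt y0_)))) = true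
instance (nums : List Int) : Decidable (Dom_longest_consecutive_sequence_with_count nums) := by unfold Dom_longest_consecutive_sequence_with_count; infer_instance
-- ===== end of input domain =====

-- B replaces A's hash-set run expansion by sort-then-scan over the distinct values; equivalence is
-- claimed on nonempty input (Pre_ excludes [], where A returns the bare int 0 instead of a pair).

-- ===== PORT A =====
-- Python's 'while current_num + 1 in num_set' walk; fuel = number of distinct elements bounds the
-- run length, so the fuelled recursion computes exactly the Python loop's final current_length.
def pvAWhile (numSet : PySem.Set Int) : Nat → Int → Int → Int
  | 0, _, len => len
  | fuel + 1, cur, len =>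
    if PySem.Set.contains numSet (cur + 1) then pvAWhile numSet fuel (cur + 1) (len + 1) else len

def longest_consecutive_sequence_with_count (nums : List Int) : Int × Int :=
  if nums = [] then (0, 0)   -- Python returns the bare int 0 here; excluded by Pre_
  else
    let numSet : PySem.Set Int := PySem.Set.ofList nums
    numSet.foldl (fun (mc : Int × Int) num =>
      if !PySem.Set.contains numSet (num - 1) then
        let currentLength := pvAWhile numSet numSet.length num 1
        if currentLength > mc.1 then (currentLength, 1)
        else if currentLength = mc.1 then (mc.1, mc.2 + 1)
        else mc
      else mc) (0, 0)

-- ===== PORT B =====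
-- the 'for prev, x in zip(s, s[1:])' grouping loop: state = (prev, current run length)
def pvGroupLens (prev run : Int) : List Int → List Int
  | [] => [run]
  | x :: rest => if x = prev + 1 then pvGroupLens x (run + 1) rest else run :: pvGroupLens x 1 rest

def longest_consecutive_sequence_with_count_alt (nums : List Int) : Int × Int :=
  if nums = [] then (0, 0)   -- Python returns the bare int 0 here; excluded by Pre_
  else
    let s := PySem.List.sorted (PySem.Set.ofList nums) (fun x => x) false
    let lengths := match s with
      | [] => [(1 : Int)]           -- zip loop body never runs; lengths = [run] = [1]
      | h :: rest => pvGroupLens h 1 rest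
    lengths.foldl (fun (mc : Int × Int) len =>
      if len > mc.1 then (len, 1)
      else if len = mc.1 then (mc.1, mc.2 + 1)
      else mc) (0, 0)

-- ===== PRECONDITION & SPEC =====
-- Pre_ excludes only the empty list, on which A returns the bare int 0 instead of an (int, int) pair.
def Pre_longest_consecutive_sequence_with_count (nums : List Int) : Prop := nums ≠ []
instance (nums : List Int) : Decidable (Pre_longest_consecutive_sequence_with_count nums) := by unfold Pre_longest_consecutive_sequence_with_count; infer_instance
def pvWitness_longest_consecutive_sequence_with_count : List Int := [1, 2, 4]

def Spec_longest_consecutive_sequence_with_count (nums : List Int) (out : Int × Int) : Prop := out = longest_consecutive_sequence_with_count_alt nums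
instance (nums : List Int) (out : Int × Int) : Decidable (Spec_longest_consecutive_sequence_with_count nums out) := by unfold Spec_longest_consecutive_sequence_with_count; infer_instance

-- ===== CLAIM (what is proved, stated in full; the proofs are below) =====
def Claim_equal_longest_consecutive_sequence_with_count : Prop := ∀ (nums : List Int), Dom_longest_consecutive_sequence_with_count nums → Pre_longest_consecutive_sequence_with_count nums → Spec_longest_consecutive_sequence_with_count nums (longest_consecutive_sequence_with_count nums)

-- ===== LEMMAS AND PROOFS =====

-- the shared max/count update step
def pvUpd (mc : Int × Int) (len : Int) : Int × Int :=
  if len > mc.1 then (len, 1) else if len = mc.1 then (mc.1, mc.2 + 1) else mc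

theorem pvUpd_rightComm : ∀ (b : Int × Int) (x y : Int), pvUpd (pvUpd b x) y = pvUpd (pvUpd b y) x := by
  rintro ⟨m, c⟩ x y
  simp only [pvUpd]
  split_ifs <;> (try dsimp only at *) <;> rw [Prod.ext_iff] <;> constructor <;> dsimp only <;> omega

-- one-step unfolding of the while loop
theorem pvAWhile_succ (S : PySem.Set Int) (f : Nat) (cur len : Int) :
    pvAWhile S (f + 1) cur len =
      if PySem.Set.contains S (cur + 1) then pvAWhile S f (cur + 1) (len + 1) else len := rfl

-- accumulator form of the while loop
theorem pvAWhile_acc (S : PySem.Set Int) : ∀ (fuel : Nat) (cur len : Int),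
    pvAWhile S fuel cur len = len + pvAWhile S fuel cur 0 := by
  intro fuel
  induction fuel with
  | zero => intro cur len; simp [pvAWhile]
  | succ f ih =>
    intro cur len
    rw [pvAWhile_succ S f cur len, pvAWhile_succ S f cur 0]
    by_cases h : PySem.Set.contains S (cur + 1) = true
    · rw [if_pos h, if_pos h, ih (cur + 1) (len + 1), ih (cur + 1) (0 + 1)]
      ring
    · rw [if_neg h, if_neg h]
      ring

theorem pvAWhile_of_not_mem (S : PySem.Set Int) (fuel : Nat) (x : Int) (h : x + 1 ∉ S) :
    pvAWhile S fuel x 0 = 0 := by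
  cases fuel with
  | zero => rfl
  | succ f => simp [pvAWhile_succ, h]

-- enough fuel: the walk from x visits only elements of S greater than x
theorem pvAWhile_stab (S : PySem.Set Int) : ∀ (fuel : Nat) (x : Int),
    (S.filter (fun y => decide (x < y))).length ≤ fuel →
    pvAWhile S (fuel + 1) x 0 = pvAWhile S fuel x 0 := by
  intro fuel
  induction fuel with
  | zero =>
    intro x hb
    by_cases h : x + 1 ∈ S
    · exfalso
      have hx : x + 1 ∈ S.filter (fun y => decide (x < y)) :=
        List.mem_filter.mpr ⟨h, decide_eq_true (by omega)⟩
      have := List.length_pos_of_mem hx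
      omega
    · rw [pvAWhile_of_not_mem S _ _ h, pvAWhile_of_not_mem S _ _ h]
  | succ f ih =>
    intro x hb
    by_cases h : x + 1 ∈ S
    · have hcon : PySem.Set.contains S (x + 1) = true := (PySem.Set.contains_iff S (x + 1)).mpr h
      have hlt : (S.filter (fun y => decide (x + 1 < y))).length <
          (S.filter (fun y => decide (x < y))).length := by
        have hsub : S.filter (fun y => decide (x + 1 < y)) =
            (S.filter (fun y => decide (x < y))).filter (fun y => decide (x + 1 < y)) := by
          rw [List.filter_filter]
          apply List.filter_congr
          intro y _
          by_cases hy : x + 1 < y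
          · simp [hy]
            omega
          · simp [hy]
        rw [hsub, List.length_filter_lt_length_iff_exists]
        refine ⟨x + 1, List.mem_filter.mpr ⟨h, decide_eq_true (by omega)⟩, by simp⟩
      have hb' : (S.filter (fun y => decide (x + 1 < y))).length ≤ f := by omega
      rw [pvAWhile_succ S (f + 1) x 0, pvAWhile_succ S f x 0, if_pos hcon, if_pos hcon,
        pvAWhile_acc S (f + 1) (x + 1) (0 + 1), pvAWhile_acc S f (x + 1) (0 + 1),
        ih (x + 1) hb']
    · rw [pvAWhile_of_not_mem S _ _ h, pvAWhile_of_not_mem S _ _ h]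

-- with full fuel the walk satisfies the natural recurrence
theorem pvAWhile_step (S : PySem.Set Int) (x : Int) (h : x + 1 ∈ S) :
    pvAWhile S S.length x 0 = 1 + pvAWhile S S.length (x + 1) 0 := by
  obtain ⟨f, hf⟩ : ∃ f, S.length = f + 1 := by
    have := List.length_pos_of_mem h
    exact ⟨S.length - 1, by omega⟩
  have hcon : PySem.Set.contains S (x + 1) = true := (PySem.Set.contains_iff S (x + 1)).mpr h
  have hb : (S.filter (fun y => decide (x + 1 < y))).length ≤ f := by
    have : (S.filter (fun y => decide (x + 1 < y))).length < S.length := by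
      rw [List.length_filter_lt_length_iff_exists]
      exact ⟨x + 1, h, by simp⟩
    omega
  calc pvAWhile S S.length x 0
      = pvAWhile S (f + 1) x 0 := by rw [hf]
    _ = pvAWhile S f (x + 1) (0 + 1) := by rw [pvAWhile_succ S f x 0, if_pos hcon]
    _ = (0 + 1) + pvAWhile S f (x + 1) 0 := pvAWhile_acc S f (x + 1) (0 + 1)
    _ = 1 + pvAWhile S (f + 1) (x + 1) 0 := by rw [pvAWhile_stab S f (x + 1) hb]; ring
    _ = 1 + pvAWhile S S.length (x + 1) 0 := by rw [hf]

-- A's fold skips non-starts and applies pvUpd with the walk length at each start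
theorem pvFoldA_eq (S : PySem.Set Int) : ∀ (l : List Int) (acc : Int × Int),
    l.foldl (fun (mc : Int × Int) num =>
      if !PySem.Set.contains S (num - 1) then
        let currentLength := pvAWhile S S.length num 1
        if currentLength > mc.1 then (currentLength, 1)
        else if currentLength = mc.1 then (mc.1, mc.2 + 1)
        else mc
      else mc) acc
    = ((l.filter (fun num => !PySem.Set.contains S (num - 1))).map
        (fun num => pvAWhile S S.length num 1)).foldl pvUpd acc := by
  intro l
  induction l with
  | nil => intro acc; rfl
  | cons a t ih =>
    intro acc
    simp only [List.foldl_cons, List.filter_cons]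
    by_cases h : PySem.Set.contains S (a - 1) = true
    · rw [if_neg (by rw [h]; decide), if_neg (by rw [h]; decide)]
      exact ih acc
    · have hf : PySem.Set.contains S (a - 1) = false := Bool.eq_false_iff.mpr h
      have h' : (!PySem.Set.contains S (a - 1)) = true := by rw [hf]; rfl
      rw [if_pos h', if_pos h', List.map_cons, List.foldl_cons]
      exact ih _

-- B's grouping produces exactly the walk length at each run start, in sorted order
theorem pvGroup_spec (S : PySem.Set Int) : ∀ (rest : List Int) (prev run : Int),
    (∀ y, y ∈ rest ↔ (y ∈ S ∧ prev < y)) → rest.Pairwise (· < ·) → prev ∈ S →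
    pvGroupLens prev run rest
      = (run + pvAWhile S S.length prev 0) ::
        (rest.filter (fun x => !PySem.Set.contains S (x - 1))).map
          (fun x => pvAWhile S S.length x 1) := by
  intro rest
  induction rest with
  | nil =>
    intro prev run hmem _ _
    have hnm : prev + 1 ∉ S := by
      intro h
      have := (hmem (prev + 1)).mpr ⟨h, by omega⟩
      simp at this
    simp [pvGroupLens, pvAWhile_of_not_mem S _ _ hnm]
  | cons x rest' ih =>
    intro prev run hmem hpw hprev
    have hx : x ∈ S ∧ prev < x := (hmem x).mp (by simp)
    have hxlt : ∀ y ∈ rest', x < y := fun y hy => (List.pairwise_cons.mp hpw).1 y hy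
    have hpw' : rest'.Pairwise (· < ·) := (List.pairwise_cons.mp hpw).2
    have hmem' : ∀ y, y ∈ rest' ↔ (y ∈ S ∧ x < y) := by
      intro y
      constructor
      · intro hy
        exact ⟨((hmem y).mp (by simp [hy])).1, hxlt y hy⟩
      · rintro ⟨hyS, hxy⟩
        have hin : y ∈ x :: rest' := (hmem y).mpr ⟨hyS, by omega⟩
        rw [List.mem_cons] at hin
        rcases hin with hin | hin
        · omega
        · exact hin
    by_cases hc : x = prev + 1
    · -- x continues the current run
      have hpS : prev + 1 ∈ S := hc ▸ hx.1
      have hconp : PySem.Set.contains S (x - 1) = true := by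
        have hxp : x - 1 = prev := by omega
        rw [hxp]; exact (PySem.Set.contains_iff S prev).mpr hprev
      simp only [pvGroupLens, if_pos hc, List.filter_cons]
      rw [if_neg (by rw [hconp]; decide), ih x (run + 1) hmem' hpw' hx.1]
      have hstep : pvAWhile S S.length prev 0 = 1 + pvAWhile S S.length (prev + 1) 0 :=
        pvAWhile_step S prev hpS
      rw [hstep, ← hc]
      congr 1
      ring
    · -- a gap: the current run ends, x starts a new one
      have hnp : prev + 1 ∉ S := by
        intro h
        have hin : prev + 1 ∈ x :: rest' := (hmem (prev + 1)).mpr ⟨h, by omega⟩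
        rw [List.mem_cons] at hin
        rcases hin with hin | hin
        · omega
        · exact absurd (hxlt _ hin) (by omega)
      have hns : x - 1 ∉ S := by
        intro h
        have hin : x - 1 ∈ x :: rest' := (hmem (x - 1)).mpr ⟨h, by omega⟩
        rw [List.mem_cons] at hin
        rcases hin with hin | hin
        · omega
        · exact absurd (hxlt _ hin) (by omega)
      have hcons : PySem.Set.contains S (x - 1) = false := by
        by_contra hb
        exact hns ((PySem.Set.contains_iff S (x - 1)).mp (by simpa using hb))
      simp only [pvGroupLens, if_neg hc, List.filter_cons]
      rw [if_pos (by rw [hcons]; rfl), ih x 1 hmem' hpw' hx.1,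
        pvAWhile_of_not_mem S _ _ hnp, List.map_cons]
      rw [pvAWhile_acc S S.length x 1]
      congr 1
      ring

-- ===== VERDICT (by name: the statement is the Claim_ definition above) =====
theorem longest_consecutive_sequence_with_count_spec : Claim_equal_longest_consecutive_sequence_with_count := by
  intro nums _hdom hne
  unfold Spec_longest_consecutive_sequence_with_count
  have hperm : (PySem.List.sorted (PySem.Set.ofList nums) (fun x => x) false).Perm
      (PySem.Set.ofList nums) := PySem.List.sorted_perm _ _ _
  have hpws : (PySem.List.sorted (PySem.Set.ofList nums) (fun x => x) false).Pairwise (· < ·) :=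
    PySem.List.sorted_ofList_pairwise_lt nums
  have hSne : (PySem.Set.ofList nums : List Int) ≠ [] := by
    cases hn : nums with
    | nil => exact absurd hn hne
    | cons a t =>
      intro hempty
      have ha : a ∈ (PySem.Set.ofList (a :: t) : List Int) :=
        (PySem.Set.mem_ofList _ _).mpr (by simp)
      rw [hempty] at ha
      simp at ha
  obtain ⟨h, rest, hrest⟩ : ∃ h rest,
      PySem.List.sorted (PySem.Set.ofList nums) (fun x => x) false = h :: rest := by
    cases hcase : PySem.List.sorted (PySem.Set.ofList nums) (fun x => x) false with
    | nil => exact absurd ((PySem.List.sorted_eq_nil_iff _ _ _).mp hcase) hSne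
    | cons a t => exact ⟨a, t, rfl⟩
  have hmems : ∀ y : Int, y ∈ h :: rest ↔ y ∈ (PySem.Set.ofList nums : List Int) := by
    intro y; rw [← hrest]; exact hperm.mem_iff
  rw [hrest] at hpws
  have hhd : h ∈ (PySem.Set.ofList nums : List Int) := (hmems h).mp (by simp)
  have hlt : ∀ y ∈ rest, h < y := (List.pairwise_cons.mp hpws).1
  have hpwrest : rest.Pairwise (· < ·) := (List.pairwise_cons.mp hpws).2
  have hmemrest : ∀ y, y ∈ rest ↔ (y ∈ (PySem.Set.ofList nums : List Int) ∧ h < y) := by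
    intro y
    constructor
    · intro hy
      exact ⟨(hmems y).mp (by simp [hy]), hlt y hy⟩
    · rintro ⟨hyS, hhy⟩
      have hin : y ∈ h :: rest := (hmems y).mpr hyS
      rw [List.mem_cons] at hin
      rcases hin with hin | hin
      · omega
      · exact hin
  have hstart : h - 1 ∉ (PySem.Set.ofList nums : List Int) := by
    intro hmem
    have hin : h - 1 ∈ h :: rest := (hmems (h - 1)).mpr hmem
    rw [List.mem_cons] at hin
    rcases hin with hin | hin
    · omega
    · exact absurd (hlt _ hin) (by omega)
  have hconh : PySem.Set.contains (PySem.Set.ofList nums) (h - 1) = false := by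
    by_contra hb
    exact hstart ((PySem.Set.contains_iff _ _).mp (by simpa using hb))
  -- A's value as a fold of pvUpd over the run lengths, in set-insertion order
  have hA : longest_consecutive_sequence_with_count nums
      = (((PySem.Set.ofList nums : List Int).filter
            (fun num => !PySem.Set.contains (PySem.Set.ofList nums) (num - 1))).map
          (fun num => pvAWhile (PySem.Set.ofList nums)
            (PySem.Set.ofList nums : List Int).length num 1)).foldl pvUpd (0, 0) := by
    unfold longest_consecutive_sequence_with_count
    rw [if_neg hne]
    exact pvFoldA_eq (PySem.Set.ofList nums) (PySem.Set.ofList nums) (0, 0)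
  -- B's value as a fold of pvUpd over the run lengths, in sorted order
  have hB : longest_consecutive_sequence_with_count_alt nums
      = (((h :: rest).filter
            (fun x => !PySem.Set.contains (PySem.Set.ofList nums) (x - 1))).map
          (fun x => pvAWhile (PySem.Set.ofList nums)
            (PySem.Set.ofList nums : List Int).length x 1)).foldl pvUpd (0, 0) := by
    have hBdef : longest_consecutive_sequence_with_count_alt nums
        = (pvGroupLens h 1 rest).foldl pvUpd (0, 0) := by
      unfold longest_consecutive_sequence_with_count_alt
      rw [if_neg hne, hrest]
      rfl
    rw [hBdef, pvGroup_spec (PySem.Set.ofList nums) rest h 1 hmemrest hpwrest hhd]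
    have hhead : (1 : Int) + pvAWhile (PySem.Set.ofList nums)
        (PySem.Set.ofList nums : List Int).length h 0
        = pvAWhile (PySem.Set.ofList nums) (PySem.Set.ofList nums : List Int).length h 1 :=
      (pvAWhile_acc _ _ h 1).symm
    rw [hhead, List.filter_cons, if_pos (by rw [hconh]; rfl), List.map_cons]
  rw [hA, hB]
  haveI : RightCommutative pvUpd := ⟨fun b x y => pvUpd_rightComm b x y⟩
  have hfperm := ((hrest ▸ hperm.symm :
      ((PySem.Set.ofList nums : List Int)).Perm (h :: rest)).filter
        (fun x => !PySem.Set.contains (PySem.Set.ofList nums) (x - 1))).map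
      (fun x => pvAWhile (PySem.Set.ofList nums)
        (PySem.Set.ofList nums : List Int).length x 1)
  exact hfperm.foldl_eq (0, 0)
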